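-- pv_equiv track=rewrite | github.com/1andrevich/Re-filter-lists | src/step3-content-check.py | build_text_snippet
-- ===== SOURCE A (Python) =====
-- from typing import Dict, Tuple, Optional, List, Set, Iterable
--
-- def build_text_snippet(text: str, max_words: int = 28, max_chars: int = 160) -> str:
--
--
--
--     words = text.split()
--
--
--
--     if not words:
--
--
--
--         return ""
--
--
--
--     snippet_words: List[str] = []
--
--
--
--     total_chars = 0
--
--
--
--     for word in words:
--
--
--
--         next_chars = len(word) if total_chars == 0 else len(word) + 1
--
--
--
--         if snippet_words and (len(snippet_words) >= max_words or total_chars + next_chars > max_chars):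
--
--
--
--             break
--
--
--
--         if not snippet_words and len(word) > max_chars:
--
--
--
--             snippet_words.append(word[:max_chars])
--
--
--
--             total_chars = max_chars
--
--
--
--             break
--
--
--
--         snippet_words.append(word)
--
--
--
--         total_chars += next_chars
--
--
--
--         if len(snippet_words) >= max_words or total_chars >= max_chars:
--
--
--
--             break
--
--
--
--     snippet = " ".join(snippet_words)
--
--
--
--     if len(snippet_words) < len(words):
--
--
--
--         snippet = snippet.rstrip(".,;:- ") + " ..."
--
--
--
--     return snippet
-- ===== SOURCE B (Python) =====
-- from itertools import accumulate
--
-- def build_text_snippet(text: str, max_words: int = 28, max_chars: int = 160) -> str: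
--     words = text.split()
--     if not words:
--         return ""
--     # cum[i] = len(" ".join(words[:i+1]))
--     cum = list(accumulate(len(w) + 1 for w in words))
--     cum = [c - 1 for c in cum]
--     kept = sum(1 for c in cum if c <= max_chars)
--     k = max(1, min(max_words, kept))
--     if len(words[0]) > max_chars:
--         snippet = words[0][:max_chars]
--     else:
--         snippet = " ".join(words[:k])
--     if k < len(words):
--         snippet = snippet.rstrip(".,;:- ") + " ..."
--     return snippet
-- ===== Notes on version B (the rewrite author's own statement) =====
-- stated objective: alternative
-- what changed: A's stateful greedy loop (running char total, three break sites) is replaced by a cumulative character-cost list (itertools.accumulate) plus a closed count/min/max formula for the number of kept words.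
import Mathlib
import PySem

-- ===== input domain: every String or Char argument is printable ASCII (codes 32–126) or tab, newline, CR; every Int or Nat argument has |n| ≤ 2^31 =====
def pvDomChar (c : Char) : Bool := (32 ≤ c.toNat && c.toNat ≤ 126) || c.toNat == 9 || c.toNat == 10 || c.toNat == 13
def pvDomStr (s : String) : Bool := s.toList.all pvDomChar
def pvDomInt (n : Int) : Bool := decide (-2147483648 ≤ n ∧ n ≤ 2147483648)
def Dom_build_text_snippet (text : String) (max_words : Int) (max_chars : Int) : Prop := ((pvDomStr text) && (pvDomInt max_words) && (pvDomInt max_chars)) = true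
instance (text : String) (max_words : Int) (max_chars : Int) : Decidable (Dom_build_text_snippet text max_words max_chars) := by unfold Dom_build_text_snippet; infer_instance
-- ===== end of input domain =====

-- B replaces A's stateful greedy loop (running char total, three break sites) by a cumulative
-- character-cost list plus a count/min/max formula for the cut-off index (objective: alternative).

-- shared exact port of Python's  s.rstrip(".,;:- ")  (both sources contain this very call)
def pyRstripPunct (cs : List Char) : List Char :=
  (cs.reverse.dropWhile (fun c => c ∈ ['.', ',', ';', ':', '-', ' '])).reverse

-- ===== PORT A =====
-- the for-loop of A: state = (snippet_words, total_chars); returns the final snippet_words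
def snipLoopA (mw mc : Int) : List (List Char) → List (List Char) → Int → List (List Char)
  | [], acc, _ => acc
  | w :: ws, acc, total =>
    let next : Int := if total = 0 then (w.length : Int) else (w.length : Int) + 1
    if acc ≠ [] ∧ ((acc.length : Int) ≥ mw ∨ total + next > mc) then acc
    else if acc = [] ∧ (w.length : Int) > mc then acc ++ [PySem.List.slice w none (some mc)]
    else
      let acc' := acc ++ [w]
      if (acc'.length : Int) ≥ mw ∨ total + next ≥ mc then acc'
      else snipLoopA mw mc ws acc' (total + next)

def build_text_snippet (text : String) (max_words : Int) (max_chars : Int) : String :=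
  let words := PySem.Chars.split₀ text.toList
  if words = [] then ""
  else
    let sw := snipLoopA max_words max_chars words [] 0
    let snippet := PySem.Chars.join [' '] sw
    if sw.length < words.length then String.ofList (pyRstripPunct snippet ++ [' ', '.', '.', '.'])
    else String.ofList snippet

-- ===== PORT B =====
-- cum[i] = len(" ".join(words[:i+1])): accumulate(len(w)+1) then subtract 1 from each entry
def cumLens (words : List (List Char)) : List Int :=
  (((words.map (fun w => (w.length : Int) + 1)).scanl (· + ·) 0).tail).map (· - 1)

def build_text_snippet_alt (text : String) (max_words : Int) (max_chars : Int) : String :=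
  let words := PySem.Chars.split₀ text.toList
  match words with
  | [] => ""
  | w0 :: _ =>
    let cum := cumLens words
    let kept : Int := (cum.countP (fun c => decide (c ≤ max_chars)) : Int)
    let k : Int := max 1 (min max_words kept)
    let snippet :=
      if (w0.length : Int) > max_chars then PySem.List.slice w0 none (some max_chars)
      else PySem.Chars.join [' '] (PySem.List.slice words none (some k))
    if k < (words.length : Int) then String.ofList (pyRstripPunct snippet ++ [' ', '.', '.', '.'])
    else String.ofList snippet

-- ===== PRECONDITION & SPEC =====
def Spec_build_text_snippet (text : String) (max_words : Int) (max_chars : Int) (out : String) : Prop := out = build_text_snippet_alt text max_words max_chars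
instance (text : String) (max_words : Int) (max_chars : Int) (out : String) : Decidable (Spec_build_text_snippet text max_words max_chars out) := by unfold Spec_build_text_snippet; infer_instance

-- ===== CLAIM (what is proved, stated in full; the proofs are below) =====
def Claim_equal_build_text_snippet : Prop := ∀ (text : String) (max_words : Int) (max_chars : Int), Dom_build_text_snippet text max_words max_chars → Spec_build_text_snippet text max_words max_chars (build_text_snippet text max_words max_chars)

-- ===== LEMMAS AND PROOFS =====



-- cumulative character costs of the words after the first, starting from running total t
def tailSums (t : Int) : List (List Char) → List Int
  | [] => []
  | w :: ws => (t + w.length + 1) :: tailSums (t + w.length + 1) ws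

-- number of extra words A's loop keeps from ws, entered with acc-length j and total t
def gA (mw mc : Int) : List (List Char) → Int → Int → Nat
  | [], _, _ => 0
  | w :: ws, j, t =>
    if j ≥ mw ∨ t + w.length + 1 > mc then 0
    else if j + 1 ≥ mw ∨ t + w.length + 1 ≥ mc then 1
    else 1 + gA mw mc ws (j + 1) (t + w.length + 1)

-- every word produced by split() is nonempty
lemma split0_go_ne_nil : ∀ (s cur : List Char) (acc : List (List Char)),
    (∀ w ∈ acc, w ≠ []) → ∀ w ∈ PySem.Chars.split₀.go s cur acc, w ≠ [] := by
  intro s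
  induction s with
  | nil =>
    intro cur acc hacc w hw
    simp only [PySem.Chars.split₀.go] at hw
    split at hw
    · exact hacc w (List.mem_reverse.mp hw)
    · rename_i hcur
      rcases List.mem_cons.mp (List.mem_reverse.mp hw) with h | h
      · subst h
        simp only [List.isEmpty_iff] at hcur
        simpa using hcur
      · exact hacc w h
  | cons c rest ih =>
    intro cur acc hacc w hw
    simp only [PySem.Chars.split₀.go] at hw
    split at hw
    · split at hw
      · exact ih [] acc hacc w hw
      · rename_i hcur
        refine ih [] _ ?_ w hw
        intro u hu
        rcases List.mem_cons.mp hu with h | h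
        · subst h
          simp only [List.isEmpty_iff] at hcur
          simpa using hcur
        · exact hacc u h
    · exact ih (c :: cur) acc hacc w hw

lemma split0_ne_nil (s : List Char) : ∀ w ∈ PySem.Chars.split₀ s, w ≠ [] := by
  have h := split0_go_ne_nil s [] [] (by simp)
  simpa [PySem.Chars.split₀] using h

lemma scanl_shift (ws : List (List Char)) (a : Int) :
    (((ws.map (fun w => (w.length : Int) + 1)).scanl (· + ·) a)).map (· - 1)
      = (a - 1) :: tailSums (a - 1) ws := by
  induction ws generalizing a with
  | nil => simp [tailSums, List.scanl]
  | cons w ws ih =>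
    simp only [List.map_cons, List.scanl_cons, tailSums]
    rw [ih]
    have h : a + ((w.length : Int) + 1) - 1 = a - 1 + (w.length : Int) + 1 := by ring
    rw [h]

lemma cumLens_eq (ws : List (List Char)) : cumLens ws = tailSums (-1) ws := by
  unfold cumLens
  rw [List.map_tail, scanl_shift]
  norm_num

lemma cnt_zero (mc : Int) (ws : List (List Char)) (t : Int) (h : mc ≤ t) :
    (tailSums t ws).countP (fun c => decide (c ≤ mc)) = 0 := by
  induction ws generalizing t with
  | nil => simp [tailSums]
  | cons w ws ih =>
    have h1 : ¬ (t + (w.length : Int) + 1 ≤ mc) := by omega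
    simp [tailSums, h1, ih (t + w.length + 1) (by omega)]

lemma loopA_eq (mw mc : Int) (ws : List (List Char)) :
    ∀ acc t, acc ≠ [] → 1 ≤ t →
      snipLoopA mw mc ws acc t = acc ++ ws.take (gA mw mc ws (acc.length : Int) t) := by
  induction ws with
  | nil => intro acc t _ _; simp [snipLoopA, gA]
  | cons w ws ih =>
    intro acc t hacc ht
    have ht0 : ¬ ((t : Int) = 0) := by omega
    rw [snipLoopA]
    simp only [if_neg ht0]
    by_cases h1 : (acc.length : Int) ≥ mw ∨ t + ((w.length : Int) + 1) > mc
    · have hg : gA mw mc (w :: ws) (acc.length : Int) t = 0 := by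
        rw [gA, if_pos (by omega)]
      rw [hg, if_pos ⟨hacc, h1⟩]
      simp
    · rw [if_neg (fun h => h1 h.2), if_neg (fun h => hacc h.1)]
      by_cases h2 : ((acc.length : Int) + 1 ≥ mw ∨ t + (w.length : Int) + 1 ≥ mc)
      · have hg : gA mw mc (w :: ws) (acc.length : Int) t = 1 := by
          rw [gA, if_neg (by omega), if_pos (by omega)]
        rw [hg, if_pos (by simp only [List.length_append, List.length_cons,
              List.length_nil]; push_cast; omega)]
        simp
      · have hg : gA mw mc (w :: ws) (acc.length : Int) t
            = 1 + gA mw mc ws ((acc.length : Int) + 1) (t + (w.length : Int) + 1) := by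
          rw [gA, if_neg (by omega), if_neg (by omega)]
        rw [hg, if_neg (by simp only [List.length_append, List.length_cons,
              List.length_nil]; push_cast; omega)]
        rw [ih (acc ++ [w]) (t + ((w.length : Int) + 1)) (by simp) (by omega)]
        have harg : t + ((w.length : Int) + 1) = t + (w.length : Int) + 1 := by ring
        rw [harg, List.append_assoc]
        congr 1
        have hlen2 : ((acc ++ [w]).length : Int) = (acc.length : Int) + 1 := by simp
        rw [hlen2, Nat.add_comm, List.take_succ_cons, List.singleton_append]

lemma gA_eq (mw mc : Int) (ws : List (List Char)) :
    ∀ j t, j < mw → t < mc →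
      (gA mw mc ws j t : Int)
        = min (mw - j) ((tailSums t ws).countP (fun c => decide (c ≤ mc)) : Int) := by
  induction ws with
  | nil => intro j t hj ht; simp [gA, tailSums]; omega
  | cons w ws ih =>
    intro j t hj ht
    rw [gA, tailSums]
    by_cases h1 : j ≥ mw ∨ t + (w.length : Int) + 1 > mc
    · rw [if_pos h1]
      have hc : ¬ (t + (w.length : Int) + 1 ≤ mc) := by omega
      rw [List.countP_cons]
      simp only [hc, decide_false]
      rw [cnt_zero mc ws _ (by omega)]
      simp
      omega
    · by_cases h2 : j + 1 ≥ mw ∨ t + (w.length : Int) + 1 ≥ mc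
      · rw [if_neg (by omega), if_pos h2]
        have hc : (t + (w.length : Int) + 1 ≤ mc) := by omega
        rw [List.countP_cons]
        simp only [hc, decide_true, if_true]
        by_cases h3 : mc ≤ t + (w.length : Int) + 1
        · rw [cnt_zero mc ws _ h3]
          simp
          omega
        · push_cast
          omega
      · rw [if_neg (by omega), if_neg h2]
        have hc : (t + (w.length : Int) + 1 ≤ mc) := by omega
        rw [List.countP_cons]
        simp only [hc, decide_true, if_true]
        push_cast
        rw [ih (j + 1) (t + (w.length : Int) + 1) (by omega) (by omega)]
        omega

-- ===== VERDICT (by name: the statement is the Claim_ definition above) =====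

theorem build_text_snippet_spec : Claim_equal_build_text_snippet := by
  intro text mw mc _
  unfold Spec_build_text_snippet build_text_snippet build_text_snippet_alt
  cases hws : PySem.Chars.split₀ text.toList with
  | nil => simp
  | cons w0 ws =>
    have hw0 : w0 ≠ [] := split0_ne_nil _ _ (by rw [hws]; exact List.mem_cons_self ..)
    have hL0 : 1 ≤ (w0.length : Int) := by
      have h : w0.length ≠ 0 := fun h => hw0 (List.length_eq_zero_iff.mp h)
      omega
    have hcum : cumLens (w0 :: ws) = (w0.length : Int) :: tailSums (w0.length : Int) ws := by
      rw [cumLens_eq, tailSums]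
      norm_num
    simp only [List.cons_ne_nil, if_false, hcum, List.countP_cons]
    by_cases hc1 : (w0.length : Int) > mc
    · -- the first word alone exceeds max_chars: both sides truncate it
      have hsw : snipLoopA mw mc (w0 :: ws) [] 0 = [PySem.List.slice w0 none (some mc)] := by
        rw [snipLoopA]
        rw [if_neg (by simp), if_pos (by simp; omega)]
        simp
      have hX : (tailSums (w0.length : Int) ws).countP (fun c => decide (c ≤ mc)) = 0 :=
        cnt_zero mc ws _ (by omega)
      have hd : decide ((w0.length : Int) ≤ mc) = false := decide_eq_false (by omega)
      simp only [hsw, hX, hd, Bool.false_eq_true, if_false, Nat.add_zero, Nat.cast_zero,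
        if_pos hc1, PySem.Chars.join_singleton, List.length_singleton]
      rw [show max 1 (min mw (0 : Int)) = 1 from by omega]
      exact if_congr (by omega) rfl rfl
    · have hhead : ((w0.length : Int) ≤ mc) := by omega
      have hd : decide ((w0.length : Int) ≤ mc) = true := decide_eq_true hhead
      by_cases hc2 : (1 : Int) ≥ mw ∨ (w0.length : Int) ≥ mc
      · -- the loop stops right after keeping the first word
        have hsw : snipLoopA mw mc (w0 :: ws) [] 0 = [w0] := by
          rw [snipLoopA]
          rw [if_neg (by simp), if_neg (by simp; omega), if_pos (by simp; omega)]
          simp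
        have hk : max 1 (min mw ((((tailSums (w0.length : Int) ws).countP
            (fun c => decide (c ≤ mc)) + 1 : Nat) : Int))) = 1 := by
          rcases hc2 with h | h
          · omega
          · rw [cnt_zero mc ws _ (by omega)]
            omega
        simp only [hsw, hd, if_true, if_neg hc1]
        rw [hk]
        rw [PySem.List.slice_to _ (by omega : (0 : Int) ≤ 1)]
        rw [show ((1 : Int).toNat) = 1 from rfl]
        rw [show List.take 1 (w0 :: ws) = [w0] from by simp]
        simp only [PySem.Chars.join_singleton, List.length_singleton]
        exact if_congr (by omega) rfl rfl
      · -- general case: the loop walks into the tail of the word list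
        have hsw : snipLoopA mw mc (w0 :: ws) [] 0
            = [w0] ++ ws.take (gA mw mc ws 1 (w0.length : Int)) := by
          rw [snipLoopA]
          rw [if_neg (by simp), if_neg (by simp; omega), if_neg (by simp; omega)]
          have h := loopA_eq mw mc ws [w0] (0 + (w0.length : Int)) (by simp) (by omega)
          simpa using h
        have hg := gA_eq mw mc ws 1 (w0.length : Int) (by omega) (by omega)
        have hk : max 1 (min mw ((((tailSums (w0.length : Int) ws).countP
            (fun c => decide (c ≤ mc)) + 1 : Nat) : Int)))
            = 1 + (gA mw mc ws 1 (w0.length : Int) : Int) := by omega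
        simp only [hsw, hd, if_true, if_neg hc1]
        rw [hk]
        rw [PySem.List.slice_to _ (by omega : (0 : Int) ≤ 1 + (gA mw mc ws 1 (w0.length : Int) : Int))]
        rw [show ((1 + (gA mw mc ws 1 (w0.length : Int) : Int)).toNat)
            = gA mw mc ws 1 (w0.length : Int) + 1 from by omega]
        rw [List.take_succ_cons]
        simp only [List.singleton_append]
        exact if_congr (by simp only [List.length_cons, List.length_take]; omega) rfl rfl
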